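-- pv_equiv track=rewrite | github.com/jacobandersson86/AoC2023 | day14/parabolic_reflector_dish.py | roll_the_rocks
-- ===== SOURCE A (Python) =====
-- def roll_the_rocks(rock_line : str) :
--
--     last_was_square_rock = True
--     rock_sack = [0]
--     square_rocks = [-1]
--     for i, c in enumerate(rock_line):
--         if c == "#":
--             square_rocks.append(i)
--             last_was_square_rock = True
--             rock_sack.append(0)
--         if c == "O":
--             rock_sack[-1] += 1
--         if c == "O" or c == "." :
--             if last_was_square_rock :
--                 last_was_square_rock = False
--
--     square_rocks.append(len(rock_line))
--     rock_sack.append(0)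
--
--     new_rock_line = ""
--     for rocks, square_rock, next_square_rock in zip(rock_sack, square_rocks, square_rocks[1:]) :
--         length = next_square_rock - square_rock
--         if square_rock >= 0 :
--             new_rock_line += "#"
--         new_rock_line += "".join('O'*rocks) + "".join('.'*(length - rocks - 1))
--
--     return new_rock_line
-- ===== SOURCE B (Python) =====
-- def roll_the_rocks(rock_line: str):
--     return "#".join(
--         "O" * seg.count("O") + "." * (len(seg) - seg.count("O"))
--         for seg in rock_line.split("#")
--     )
-- ===== Notes on version B (the rewrite author's own statement) =====
-- stated objective: simpler
-- what changed: Replaces A's parallel rock-count/wall-position index arrays and the zipped boundary-triple rebuild loop with a split on the wall character, a per-segment count-and-refill, and a join.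
import Mathlib
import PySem

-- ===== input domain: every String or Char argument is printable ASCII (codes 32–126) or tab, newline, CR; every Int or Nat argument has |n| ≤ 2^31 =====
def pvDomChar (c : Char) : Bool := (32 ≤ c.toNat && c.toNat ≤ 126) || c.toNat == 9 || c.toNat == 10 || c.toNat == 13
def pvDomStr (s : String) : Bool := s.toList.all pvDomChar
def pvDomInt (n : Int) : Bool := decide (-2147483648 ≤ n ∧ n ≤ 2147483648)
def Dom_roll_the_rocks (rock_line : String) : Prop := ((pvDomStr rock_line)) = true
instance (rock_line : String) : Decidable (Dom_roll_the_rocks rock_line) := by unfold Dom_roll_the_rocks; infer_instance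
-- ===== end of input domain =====

-- B replaces A's parallel index/count arrays and zipped boundary triples by split-on-the-wall-character / rebuild-each-segment / join (simpler decomposition; a timing run measured it constant-factor faster).

-- ===== PORT A =====
-- one iteration of A's first loop: state (last_was_square_rock, rock_sack, square_rocks)
def rollStep (st : Bool × List Int × List Int) (ic : Int × Char) : Bool × List Int × List Int :=
  let st :=
    if ic.2 = '#' then (true, st.2.1 ++ [(0 : Int)], st.2.2 ++ [ic.1]) else st
  let sack :=
    if ic.2 = 'O' then PySem.List.pySetD st.2.1 (-1) (PySem.List.pyGetD st.2.1 (-1) 0 + 1)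
    else st.2.1
  let lastSq :=
    if ic.2 = 'O' ∨ ic.2 = '.' then (if st.1 then false else st.1) else st.1
  (lastSq, sack, st.2.2)

-- one iteration of A's second loop (new_rock_line kept as a List Char)
def rollEmit (acc : List Char) (t : Int × Int × Int) : List Char :=
  let length := t.2.2 - t.2.1
  let acc := if t.2.1 ≥ 0 then acc ++ ['#'] else acc
  acc ++ List.replicate t.1.toNat 'O' ++ List.replicate (length - t.1 - 1).toNat '.'

def roll_the_rocks (rock_line : String) : String :=
  let cs := rock_line.toList
  let st := (PySem.List.enumerate cs).foldl rollStep (true, [0], [-1])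
  let square_rocks := st.2.2 ++ [PySem.Str.len rock_line]
  let rock_sack := st.2.1 ++ [0]
  String.mk ((List.zip rock_sack
      (List.zip square_rocks (PySem.List.slice square_rocks (some 1) none))).foldl rollEmit [])

-- ===== PORT B =====
def roll_the_rocks_alt (rock_line : String) : String :=
  String.mk (PySem.Chars.join ['#']
    ((PySem.Chars.splitOn rock_line.toList ['#']).map
      (fun seg => List.replicate (PySem.Chars.count seg ['O']) 'O'
        ++ List.replicate (seg.length - PySem.Chars.count seg ['O']) '.')))

-- ===== PRECONDITION & SPEC =====
def Spec_roll_the_rocks (rock_line : String) (out : String) : Prop := out = roll_the_rocks_alt rock_line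
instance (rock_line : String) (out : String) : Decidable (Spec_roll_the_rocks rock_line out) := by unfold Spec_roll_the_rocks; infer_instance

-- ===== CLAIM (what is proved, stated in full; the proofs are below) =====
def Claim_equal_roll_the_rocks : Prop := ∀ (rock_line : String), Dom_roll_the_rocks rock_line → Spec_roll_the_rocks rock_line (roll_the_rocks rock_line)

-- ===== LEMMAS AND PROOFS =====

-- split on '#' as a plain structural recursion
def mySplit : List Char → List (List Char)
  | [] => [[]]
  | '#' :: t => [] :: mySplit t
  | c :: t => (c :: (mySplit t).head!) :: (mySplit t).tail

theorem mySplit_ne_nil (s : List Char) : mySplit s ≠ [] := by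
  match s with
  | [] => simp [mySplit]
  | '#' :: t => simp [mySplit]
  | c :: t =>
    by_cases hc : c = '#'
    · subst hc; simp [mySplit]
    · rw [mySplit]
      · simp
      · exact fun h => hc h

theorem splitOn_go_eq (l : List Char) : ∀ (fuel : Nat) (cur : List Char) (acc : List (List Char)),
    l.length < fuel →
    PySem.Chars.splitOn.go ['#'] fuel l cur acc
      = acc.reverse ++ ((cur.reverse ++ (mySplit l).head!) :: (mySplit l).tail) := by
  induction l with
  | nil =>
    intro fuel cur acc h
    match fuel with
    | f + 1 => simp [PySem.Chars.splitOn.go, mySplit]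
  | cons c t ih =>
    intro fuel cur acc h
    match fuel with
    | f + 1 =>
      rw [PySem.Chars.splitOn.go]
      rcases h' : mySplit t with _ | ⟨hh, r⟩
      · exact absurd h' (mySplit_ne_nil t)
      by_cases hc : c = '#'
      · subst hc
        rw [if_pos (by simp)]
        show PySem.Chars.splitOn.go ['#'] f t [] (cur.reverse :: acc) = _
        rw [ih f [] (cur.reverse :: acc) (by simpa using h),
            show mySplit ('#' :: t) = [] :: mySplit t from rfl]
        rw [h']; simp
      · rw [if_neg (by simp; exact fun hq => hc hq.symm)]
        rw [ih f (c :: cur) acc (by simpa using h),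
            show mySplit (c :: t) = (c :: (mySplit t).head!) :: (mySplit t).tail from by
              rw [mySplit]; exact fun h => hc h]
        rw [h']; simp

theorem splitOn_eq_mySplit (s : List Char) : PySem.Chars.splitOn s ['#'] = mySplit s := by
  rw [PySem.Chars.splitOn, splitOn_go_eq s (s.length + 1) [] [] (by omega)]
  rcases h' : mySplit s with _ | ⟨hh, r⟩
  · exact absurd h' (mySplit_ne_nil s)
  · simp

theorem count_go_eq (l : List Char) : ∀ (fuel : Nat) (acc : Nat), l.length ≤ fuel →
    PySem.Chars.count.go ['O'] fuel l acc = acc + l.count 'O' := by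
  induction l with
  | nil =>
    intro fuel acc h
    match fuel with
    | 0 => simp [PySem.Chars.count.go]
    | f + 1 => simp [PySem.Chars.count.go]
  | cons c t ih =>
    intro fuel acc h
    match fuel with
    | f + 1 =>
      rw [PySem.Chars.count.go]
      by_cases hc : c = 'O'
      · subst hc
        rw [if_pos (by simp)]
        show PySem.Chars.count.go ['O'] f t (acc + 1) = _
        rw [ih f (acc + 1) (by simpa using h)]
        simp [List.count_cons]
        omega
      · rw [if_neg (by simp; exact fun hq => hc hq.symm)]
        rw [ih f acc (by simpa using h)]
        simp [hc]

theorem count_eq_count (seg : List Char) : PySem.Chars.count seg ['O'] = seg.count 'O' := by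
  rw [PySem.Chars.count]
  simp [count_go_eq seg seg.length 0 (le_refl _)]

theorem pySetD_append_last (pre : List Int) (x v : Int) :
    PySem.List.pySetD (pre ++ [x]) (-1) v = pre ++ [v] := by
  simp [PySem.List.pySetD, PySem.List.pySet?, PySem.List.pyIdx?]

-- the (rock_sack, square_rocks) part of A's first loop (last_was_square_rock does not feed it)
def gStep (pr : List Int × List Int) (ic : Int × Char) : List Int × List Int :=
  let pr := if ic.2 = '#' then (pr.1 ++ [(0 : Int)], pr.2 ++ [ic.1]) else pr
  (if ic.2 = 'O' then PySem.List.pySetD pr.1 (-1) (PySem.List.pyGetD pr.1 (-1) 0 + 1) else pr.1,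
   pr.2)

theorem foldl_rollStep_snd (l : List (Int × Char)) : ∀ (st : Bool × List Int × List Int),
    (l.foldl rollStep st).2 = l.foldl gStep st.2 := by
  induction l with
  | nil => intro st; rfl
  | cons ic t ih =>
    intro st
    rw [List.foldl_cons, List.foldl_cons, ih]
    congr 1
    simp only [rollStep, gStep]
    split <;> split <;> rfl

-- positions of '#' in s, indexing from i
def hashPos : List Char → Int → List Int
  | [], _ => []
  | c :: t, i => if c = '#' then i :: hashPos t (i + 1) else hashPos t (i + 1)

theorem gStep_loop (s : List Char) : ∀ (i : Int) (sack0 : List Int) (x : Int) (sq : List Int),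
    (PySem.List.enumerate s i).foldl gStep (sack0 ++ [x], sq)
      = (sack0 ++ (x + ((mySplit s).head!.count 'O' : Int))
            :: (mySplit s).tail.map (fun seg => (seg.count 'O' : Int)),
         sq ++ hashPos s i) := by
  induction s with
  | nil => intro i sack0 x sq; simp [PySem.List.enumerate, mySplit, hashPos]
  | cons c t ih =>
    intro i sack0 x sq
    rw [PySem.List.enumerate_cons, List.foldl_cons]
    by_cases hc : c = '#'
    · subst hc
      have hg : gStep (sack0 ++ [x], sq) (i, '#') = ((sack0 ++ [x]) ++ [(0:Int)], sq ++ [i]) := by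
        simp [gStep]
      rw [hg, ih (i+1) (sack0 ++ [x]) 0 (sq ++ [i])]
      rw [show mySplit ('#' :: t) = [] :: mySplit t from rfl]
      rcases h' : mySplit t with _ | ⟨hh, r⟩
      · exact absurd h' (mySplit_ne_nil t)
      simp [hashPos, h']
    · have hsplit : mySplit (c :: t) = (c :: (mySplit t).head!) :: (mySplit t).tail := by
        rw [mySplit]; exact fun h => hc h
      by_cases ho : c = 'O'
      · subst ho
        have hg : gStep (sack0 ++ [x], sq) (i, 'O') = (sack0 ++ [x + 1], sq) := by
          simp [gStep, pySetD_append_last, PySem.List.pyGetD_neg_one_append_singleton]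
        rw [hg, ih (i+1) sack0 (x+1) sq, hsplit]
        rcases h' : mySplit t with _ | ⟨hh, r⟩
        · exact absurd h' (mySplit_ne_nil t)
        simp [h', hashPos, hc, List.count_cons]
        ring
      · have hg : gStep (sack0 ++ [x], sq) (i, c) = (sack0 ++ [x], sq) := by
          simp [gStep, hc, ho]
        rw [hg, ih (i+1) sack0 x sq, hsplit]
        simp [hashPos, hc, List.count_cons, ho]

-- the boundary list [p, p + len seg₀ + 1, …] of a segment list, started at p
def sqList : Int → List (List Char) → List Int
  | p, [] => [p]
  | p, seg :: rest => p :: sqList (p + seg.length + 1) rest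

theorem sqList_eq (s : List Char) : ∀ (p : Int),
    p :: (hashPos s (p + 1) ++ [p + 1 + s.length]) = sqList p (mySplit s) := by
  induction s with
  | nil => intro p; simp [hashPos, mySplit, sqList]
  | cons c t ih =>
    intro p
    by_cases hc : c = '#'
    · subst hc
      rw [show mySplit ('#' :: t) = [] :: mySplit t from rfl]
      rw [show sqList p ([] :: mySplit t) = p :: sqList (p + 1) (mySplit t) from by
        simp [sqList]]
      rw [← ih (p + 1)]
      simp [hashPos]
      ring
    · have hsplit : mySplit (c :: t) = (c :: (mySplit t).head!) :: (mySplit t).tail := by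
        rw [mySplit]; exact fun h => hc h
      rcases h' : mySplit t with _ | ⟨hh, r⟩
      · exact absurd h' (mySplit_ne_nil t)
      rw [hsplit, h']
      have iht := ih (p + 1)
      rw [h'] at iht
      have tl : hashPos t (p + 1 + 1) ++ [p + 1 + 1 + (t.length : Int)]
          = sqList (p + 1 + (hh.length : Int) + 1) r := by
        have h2 := congrArg List.tail iht
        simpa [sqList] using h2
      simp only [List.head!, List.tail_cons]
      rw [show sqList p ((c :: hh) :: r) = p :: sqList (p + ((c :: hh).length : Int) + 1) r from rfl]
      congr 1
      rw [show hashPos (c :: t) (p + 1) = hashPos t (p + 1 + 1) from by simp [hashPos, hc]]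
      rw [show (p + ((c :: hh).length : Int) + 1) = p + 1 + (hh.length : Int) + 1 from by
        simp; ring]
      rw [← tl]
      congr 2
      · simp
        ring

-- one rebuilt segment
def rebuild (seg : List Char) : List Char :=
  List.replicate (seg.count 'O') 'O' ++ List.replicate (seg.length - seg.count 'O') '.'

theorem emit_one (acc : List Char) (seg : List Char) (p : Int) :
    rollEmit acc ((seg.count 'O' : Int), (p, p + seg.length + 1))
      = (acc ++ (if 0 ≤ p then ['#'] else [])) ++ rebuild seg := by
  have hcle : seg.count 'O' ≤ seg.length := List.count_le_length
  simp only [rollEmit, rebuild]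
  have h1 : (p + (seg.length : Int) + 1 - p - (seg.count 'O' : Int) - 1).toNat
      = seg.length - seg.count 'O' := by omega
  have h2 : ((seg.count 'O' : Int)).toNat = seg.count 'O' := by omega
  rw [h1, h2]
  by_cases hp : 0 ≤ p
  · rw [if_pos hp, if_pos hp]; simp
  · rw [if_neg hp, if_neg hp]; simp

theorem emit_loop (segs : List (List Char)) : ∀ (p : Int) (acc : List Char), segs ≠ [] → -1 ≤ p →
    (List.zip (segs.map (fun seg => (seg.count 'O' : Int)) ++ [0])
        (List.zip (sqList p segs) ((sqList p segs).drop 1))).foldl rollEmit acc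
      = acc ++ (if 0 ≤ p then ['#'] else []) ++ PySem.Chars.join ['#'] (segs.map rebuild) := by
  induction segs with
  | nil => intro p acc h; exact absurd rfl h
  | cons seg rest ih =>
    intro p acc _ hp
    match rest with
    | [] =>
      simp only [sqList, List.map, List.cons_append, List.nil_append, List.drop,
        List.zip_cons_cons, List.zip_nil_right, List.foldl_cons, List.foldl_nil]
      rw [emit_one acc seg p]
      rw [PySem.Chars.join_singleton]
    | seg2 :: rest2 =>
      have hstep : sqList p (seg :: seg2 :: rest2)
          = p :: sqList (p + seg.length + 1) (seg2 :: rest2) := rfl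
      rw [hstep]
      have h2 : sqList (p + seg.length + 1) (seg2 :: rest2)
          = (p + seg.length + 1) :: sqList (p + seg.length + 1 + seg2.length + 1) rest2 := rfl
      rw [List.drop_one, List.tail_cons]
      rw [h2]
      simp only [List.map, List.cons_append, List.zip_cons_cons, List.foldl_cons]
      rw [← h2, emit_one acc seg p]
      have := ih (p + seg.length + 1) ((acc ++ (if 0 ≤ p then ['#'] else [])) ++ rebuild seg)
        (by simp) (by omega)
      simp only [h2, List.drop_succ_cons, List.drop_zero, List.drop_one, List.tail_cons,
        List.map, List.cons_append] at this ⊢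
      rw [this]
      rw [if_pos (show (0:Int) ≤ p + (seg.length : Int) + 1 from by omega)]
      rw [PySem.Chars.join_cons_cons]
      simp

-- ===== VERDICT (by name: the statement is the Claim_ definition above) =====
theorem roll_the_rocks_spec : Claim_equal_roll_the_rocks := by
  intro s _
  unfold Spec_roll_the_rocks
  show roll_the_rocks s = roll_the_rocks_alt s
  rcases hms : mySplit s.toList with _ | ⟨hh, tl⟩
  · exact absurd hms (mySplit_ne_nil _)
  have hst : ((PySem.List.enumerate s.toList).foldl rollStep (true, [0], [-1])).2
      = ((mySplit s.toList).map (fun seg => (seg.count 'O' : Int)), -1 :: hashPos s.toList 0) := by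
    rw [foldl_rollStep_snd]
    have h := gStep_loop s.toList 0 [] 0 [-1]
    simpa [hms] using h
  have hsq : (-1 :: hashPos s.toList 0) ++ [PySem.Str.len s] = sqList (-1) (mySplit s.toList) := by
    have h := sqList_eq s.toList (-1)
    simpa using h
  simp only [roll_the_rocks, roll_the_rocks_alt, hst]
  rw [show ((((mySplit s.toList).map (fun seg => (seg.count 'O' : Int)), -1 :: hashPos s.toList 0) :
        List Int × List Int).2 ++ [PySem.Str.len s]) = sqList (-1) (mySplit s.toList) from hsq]
  rw [PySem.List.slice_from _ (by norm_num : (0:Int) ≤ 1)]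
  rw [show ((1:Int)).toNat = 1 from rfl]
  rw [emit_loop (mySplit s.toList) (-1) [] (mySplit_ne_nil _) (by norm_num)]
  rw [splitOn_eq_mySplit]
  simp only [show (fun seg => List.replicate (PySem.Chars.count seg ['O']) 'O'
        ++ List.replicate (seg.length - PySem.Chars.count seg ['O']) '.') = rebuild from by
      funext seg; simp [count_eq_count, rebuild]]
  simp
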